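-- pv_equiv track=rewrite | github.com/soheilkhodadadi/semantic-patterns | src/semantic_ai_washing/labeling/build_labeling_sample.py | _allocate_year_quotas
-- ===== SOURCE A (Python) =====
-- def _allocate_year_quotas(year_availability: dict[str, int], total_target: int) -> dict[str, int]:
--     years = sorted(year_availability)
--     quotas = {year: 0 for year in years}
--     if not years or total_target <= 0:
--         return quotas
--
--     base = total_target // len(years)
--     remainder = total_target % len(years)
--     for idx, year in enumerate(years):
--         desired = base + (1 if idx < remainder else 0)
--         quotas[year] = min(desired, year_availability[year])
--
--     assigned = sum(quotas.values())
--     while assigned < total_target: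
--         progressed = False
--         candidates = sorted(
--             years,
--             key=lambda y: (year_availability[y] - quotas[y], y),
--             reverse=True,
--         )
--         for year in candidates:
--             if quotas[year] < year_availability[year]:
--                 quotas[year] += 1
--                 assigned += 1
--                 progressed = True
--                 if assigned == total_target:
--                     break
--         if not progressed:
--             break
--     return quotas
-- ===== SOURCE B (Python) =====
-- def _allocate_year_quotas(year_availability: dict[str, int], total_target: int) -> dict[str, int]:
--     years = sorted(year_availability)
--     n = len(years)
--     quotas = {y: 0 for y in years}
--     if n == 0 or total_target <= 0:
--         return quotas
--     base, rem = divmod(total_target, n)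
--     for i, y in enumerate(years):
--         quotas[y] = min(base + (1 if i < rem else 0), year_availability[y])
--     deficit = total_target - sum(quotas.values())
--     while deficit > 0:
--         spare = [y for y in years if quotas[y] < year_availability[y]]
--         if not spare:
--             break
--         m = len(spare)
--         if deficit < m:
--             spare.sort(key=lambda y: (year_availability[y] - quotas[y], y), reverse=True)
--             for y in spare[:deficit]:
--                 quotas[y] += 1
--             deficit = 0
--         else:
--             step = min(deficit // m, min(year_availability[y] - quotas[y] for y in spare))
--             for y in spare:
--                 quotas[y] += step
--             deficit -= step * m
--     return quotas
-- ===== Notes on version B (the rewrite author's own statement) =====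
-- stated objective: alternative
-- what changed: A distributes the shortfall one unit at a time, re-sorting all years on every round-robin pass; B batch-fills: it jumps whole uniform rounds at once (step = min(deficit//m, smallest remaining gap)) and sorts the spare years only once for the final partial round.
import Mathlib
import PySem

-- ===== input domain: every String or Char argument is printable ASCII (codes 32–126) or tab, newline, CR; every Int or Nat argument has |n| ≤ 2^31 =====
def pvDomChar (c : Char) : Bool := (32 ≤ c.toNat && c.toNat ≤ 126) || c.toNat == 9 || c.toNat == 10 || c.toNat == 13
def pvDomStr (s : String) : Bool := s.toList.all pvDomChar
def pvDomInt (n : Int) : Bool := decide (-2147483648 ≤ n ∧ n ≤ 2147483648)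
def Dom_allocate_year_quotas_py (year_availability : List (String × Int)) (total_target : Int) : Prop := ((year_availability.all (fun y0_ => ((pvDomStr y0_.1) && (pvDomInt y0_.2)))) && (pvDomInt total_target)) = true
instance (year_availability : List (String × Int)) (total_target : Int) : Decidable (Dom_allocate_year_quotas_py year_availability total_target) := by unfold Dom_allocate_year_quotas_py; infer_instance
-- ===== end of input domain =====

-- B replaces A's unit-by-unit round-robin refill (which re-sorts all years every pass) by batch water-filling:
-- it adds whole uniform rounds at once and sorts the spare years only for the final partial round.


-- ===== PORT A =====

-- shared small helpers for both ports (the expressions appear verbatim in both Pythons)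
def pvGap (avail q : PySem.Dict String Int) (y : String) : Int := avail.getD y 0 - q.getD y 0

-- A's inner `for year in candidates` loop: state (quotas, assigned, progressed), breaks as soon as assigned == total.
def pvAFor (avail : PySem.Dict String Int) (total : Int) :
    List String → PySem.Dict String Int → Int → Bool → (PySem.Dict String Int × Int × Bool)
  | [], q, s, prog => (q, s, prog)
  | y :: rest, q, s, prog =>
    if q.getD y 0 < avail.getD y 0 then
      if s + 1 = total then (q.insert y (q.getD y 0 + 1), s + 1, true)
      else pvAFor avail total rest (q.insert y (q.getD y 0 + 1)) (s + 1) true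
    else pvAFor avail total rest q s prog

-- assigned never decreases through the pass (cited by pvAWhile's termination proof)
theorem pvAFor_le (avail : PySem.Dict String Int) (total : Int) :
    ∀ (cands : List String) (q : PySem.Dict String Int) (s : Int) (prog : Bool),
      s ≤ (pvAFor avail total cands q s prog).2.1 := by
  intro cands
  induction cands with
  | nil => intro q s prog; simp [pvAFor]
  | cons y rest ih =>
    intro q s prog
    simp only [pvAFor]
    split_ifs with h1 h2
    · simp
    · exact le_trans (by omega) (ih _ (s + 1) true)
    · exact ih q s prog

-- a progressed pass strictly increased assigned (cited by pvAWhile's termination proof)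
theorem pvAFor_lt (avail : PySem.Dict String Int) (total : Int) :
    ∀ (cands : List String) (q : PySem.Dict String Int) (s : Int) (prog : Bool), prog = false →
      (pvAFor avail total cands q s prog).2.2 = true → s < (pvAFor avail total cands q s prog).2.1 := by
  intro cands
  induction cands with
  | nil => intro q s prog hp hr; rw [pvAFor] at hr; simp [hp] at hr
  | cons y rest ih =>
    intro q s prog hp hr
    rw [pvAFor] at hr ⊢
    split_ifs at hr ⊢ with h1 h2
    · simp
    · exact lt_of_lt_of_le (by omega) (pvAFor_le avail total rest _ (s + 1) true)
    · exact ih q s prog hp hr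

-- A's `while assigned < total_target` loop
def pvAWhile (avail : PySem.Dict String Int) (years : List String) (total : Int)
    (q : PySem.Dict String Int) (s : Int) : PySem.Dict String Int :=
  if hlt : s < total then
    if hp : (pvAFor avail total (PySem.List.sorted2 years (pvGap avail q) (fun y => y) true) q s false).2.2 = true then
      pvAWhile avail years total
        (pvAFor avail total (PySem.List.sorted2 years (pvGap avail q) (fun y => y) true) q s false).1
        (pvAFor avail total (PySem.List.sorted2 years (pvGap avail q) (fun y => y) true) q s false).2.1
    else (pvAFor avail total (PySem.List.sorted2 years (pvGap avail q) (fun y => y) true) q s false).1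
  else q
termination_by (total - s).toNat
decreasing_by
  have h := pvAFor_lt avail total
    (PySem.List.sorted2 years (pvGap avail q) (fun y => y) true) q s false rfl hp
  omega

def allocate_year_quotas_py (year_availability : List (String × Int)) (total_target : Int) : List (String × Int) :=
  let avail := PySem.Dict.ofList year_availability
  let years := PySem.List.sorted avail.keys (fun y => y) false
  let quotas0 := years.foldl (fun d y => d.insert y (0 : Int)) PySem.Dict.empty
  if years = [] ∨ total_target ≤ 0 then quotas0.items
  else
    let base := PySem.Int.floordiv total_target years.length
    let rem := PySem.Int.mod total_target years.length
    let quotas1 := (PySem.List.enumerate years 0).foldl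
      (fun d p => d.insert p.2 (min (base + (if p.1 < rem then 1 else 0)) (avail.getD p.2 0))) quotas0
    (pvAWhile avail years total_target quotas1 quotas1.values.sum).items

-- ===== PORT B =====

def pvSpare (avail q : PySem.Dict String Int) (years : List String) : List String :=
  years.filter (fun y => q.getD y 0 < avail.getD y 0)

-- B's `quotas[y] += c for y in l` loop
def pvAdd (l : List String) (c : Int) (q : PySem.Dict String Int) : PySem.Dict String Int :=
  l.foldl (fun d y => d.insert y (d.getD y 0 + c)) q

-- B's `step = min(deficit // m, min(gaps))`
def pvStep (avail q : PySem.Dict String Int) (years : List String) (deficit : Int) : Int :=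
  min (PySem.Int.floordiv deficit ((pvSpare avail q years).length : Int))
    ((PySem.List.min? ((pvSpare avail q years).map (pvGap avail q)) (fun v => v)).getD 0)

-- the batch step is at least 1 (cited by pvBWhile's termination proof)
theorem pvStep_pos (avail q : PySem.Dict String Int) (years : List String) (deficit : Int)
    (hs : pvSpare avail q years ≠ [])
    (hd : ¬ deficit < ((pvSpare avail q years).length : Int)) :
    1 ≤ pvStep avail q years deficit := by
  have hm : (1 : Int) ≤ ((pvSpare avail q years).length : Int) := by
    have : (pvSpare avail q years).length ≠ 0 := by simpa [List.length_eq_zero_iff] using hs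
    omega
  refine le_min ?_ ?_
  · rw [PySem.Int.le_floordiv_iff_mul_le (by omega)]; omega
  · obtain ⟨g, hg⟩ : ∃ g, PySem.List.min? ((pvSpare avail q years).map (pvGap avail q)) (fun v => v) = some g := by
      cases hmin : PySem.List.min? ((pvSpare avail q years).map (pvGap avail q)) (fun v => v) with
      | none =>
        rw [PySem.List.min?_eq_none_iff, List.map_eq_nil_iff] at hmin
        exact absurd hmin hs
      | some g => exact ⟨g, rfl⟩
    rw [hg]
    have hmem := PySem.List.min?_mem hg
    simp only [List.mem_map] at hmem
    obtain ⟨y, hy, hgy⟩ := hmem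
    rw [pvSpare, List.mem_filter] at hy
    simp only [Option.getD_some]
    have : q.getD y 0 < avail.getD y 0 := by simpa using hy.2
    rw [← hgy]
    simp only [pvGap]
    omega

-- B's `while deficit > 0` loop
def pvBWhile (avail : PySem.Dict String Int) (years : List String)
    (q : PySem.Dict String Int) (deficit : Int) : PySem.Dict String Int :=
  if h0 : 0 < deficit then
    if hs : pvSpare avail q years = [] then q
    else
      if hd : deficit < ((pvSpare avail q years).length : Int) then
        pvAdd (PySem.List.slice
          (PySem.List.sorted2 (pvSpare avail q years) (pvGap avail q) (fun y => y) true)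
          none (some deficit)) 1 q
      else
        pvBWhile avail years (pvAdd (pvSpare avail q years) (pvStep avail q years deficit) q)
          (deficit - pvStep avail q years deficit * ((pvSpare avail q years).length : Int))
  else q
termination_by deficit.toNat
decreasing_by
  have h1 := pvStep_pos avail q years deficit hs hd
  have hm : (1 : Int) ≤ ((pvSpare avail q years).length : Int) := by
    have : (pvSpare avail q years).length ≠ 0 := by simpa [List.length_eq_zero_iff] using hs
    omega
  have h2 : (1 : Int) * 1 ≤ pvStep avail q years deficit * ((pvSpare avail q years).length : Int) :=
    mul_le_mul h1 hm (by omega) (by omega)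
  omega

def allocate_year_quotas_py_alt (year_availability : List (String × Int)) (total_target : Int) : List (String × Int) :=
  let avail := PySem.Dict.ofList year_availability
  let years := PySem.List.sorted avail.keys (fun y => y) false
  let quotas0 := years.foldl (fun d y => d.insert y (0 : Int)) PySem.Dict.empty
  if years.length = 0 ∨ total_target ≤ 0 then quotas0.items
  else
    let base := PySem.Int.floordiv total_target years.length
    let rem := PySem.Int.mod total_target years.length
    let quotas1 := (PySem.List.enumerate years 0).foldl
      (fun d p => d.insert p.2 (min (base + (if p.1 < rem then 1 else 0)) (avail.getD p.2 0))) quotas0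
    (pvBWhile avail years quotas1 (total_target - quotas1.values.sum)).items

-- ===== PRECONDITION & SPEC =====
def Spec_allocate_year_quotas_py (year_availability : List (String × Int)) (total_target : Int) (out : List (String × Int)) : Prop := out = allocate_year_quotas_py_alt year_availability total_target
instance (year_availability : List (String × Int)) (total_target : Int) (out : List (String × Int)) : Decidable (Spec_allocate_year_quotas_py year_availability total_target out) := by unfold Spec_allocate_year_quotas_py; infer_instance

-- ===== CLAIM (what is proved, stated in full; the proofs are below) =====
def Claim_equal_allocate_year_quotas_py : Prop := ∀ (year_availability : List (String × Int)) (total_target : Int), Dom_allocate_year_quotas_py year_availability total_target → Spec_allocate_year_quotas_py year_availability total_target (allocate_year_quotas_py year_availability total_target)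

-- ===== LEMMAS AND PROOFS =====

-- ---- dictionary infrastructure ----

theorem pv_dict_ext (d d' : PySem.Dict String Int) (hk : d.keys = d'.keys)
    (hnd : d.keys.Nodup) (hv : ∀ y ∈ d.keys, d.getD y 0 = d'.getD y 0) : d = d' := by
  apply PySem.Dict.ext
  have hkm : d.items.map Prod.fst = d'.items.map Prod.fst := hk
  have hlen : d.items.length = d'.items.length := by
    have := congrArg List.length hkm
    simpa using this
  apply List.ext_getElem hlen
  intro i h1 h2
  have hfst : d.items[i].1 = d'.items[i].1 := by
    have := congrArg (fun l => l[i]?) hkm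
    simp only [List.getElem?_map] at this
    rw [List.getElem?_eq_getElem h1, List.getElem?_eq_getElem h2] at this
    simpa using this
  have hmem1 : (d.items[i].1, d.items[i].2) ∈ d.items := by
    simp only [Prod.mk.eta]; exact List.getElem_mem h1
  have hmem2 : (d'.items[i].1, d'.items[i].2) ∈ d'.items := by
    simp only [Prod.mk.eta]; exact List.getElem_mem h2
  have hkeymem : d.items[i].1 ∈ d.keys := by
    have : d.items[i].1 ∈ d.items.map Prod.fst := List.mem_map_of_mem hmem1
    simpa [PySem.Dict.keys] using this
  have hnd' : d'.keys.Nodup := hk ▸ hnd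
  have hv1 : d.getD d.items[i].1 0 = d.items[i].2 :=
    PySem.Dict.getD_of_mem_items d hmem1 hnd 0
  have hv2 : d'.getD d'.items[i].1 0 = d'.items[i].2 :=
    PySem.Dict.getD_of_mem_items d' hmem2 hnd' 0
  have hsnd : d.items[i].2 = d'.items[i].2 := by
    rw [← hv1, ← hv2, ← hfst]
    exact hv d.items[i].1 hkeymem
  exact Prod.ext hfst hsnd

theorem pv_keys_pvAdd (c : Int) : ∀ (l : List String) (q : PySem.Dict String Int),
    (∀ y ∈ l, y ∈ q.keys) → (pvAdd l c q).keys = q.keys := by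
  intro l
  induction l with
  | nil => intro q _; rfl
  | cons y rest ih =>
    intro q h
    have hy : y ∈ q.keys := h y (by simp)
    have hk : (q.insert y (q.getD y 0 + c)).keys = q.keys :=
      PySem.Dict.keys_insert_of_contains q _ ((PySem.Dict.contains_iff_mem_keys q y).mpr hy)
    have : pvAdd (y :: rest) c q = pvAdd rest c (q.insert y (q.getD y 0 + c)) := rfl
    rw [this, ih _ (by intro z hz; rw [hk]; exact h z (by simp [hz])), hk]

theorem pv_getD_pvAdd (c : Int) : ∀ (l : List String) (q : PySem.Dict String Int), l.Nodup → ∀ z,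
    (pvAdd l c q).getD z 0 = q.getD z 0 + (if z ∈ l then c else 0) := by
  intro l
  induction l with
  | nil => intro q _ z; simp [pvAdd]
  | cons y rest ih =>
    intro q hnd z
    have hstep : pvAdd (y :: rest) c q = pvAdd rest c (q.insert y (q.getD y 0 + c)) := rfl
    rw [hstep, ih _ hnd.of_cons z, PySem.Dict.getD_insert]
    by_cases hz : z = y
    · subst hz
      have : z ∉ rest := (List.nodup_cons.mp hnd).1
      simp [this]
    · simp [hz, List.mem_cons]

-- ---- small arithmetic / list facts ----

theorem pv_foldl_min_shift : ∀ (xs : List Int) (a : Int),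
    (xs.map (fun v => v - 1)).foldl min (a - 1) = xs.foldl min a - 1 := by
  intro xs
  induction xs with
  | nil => intro a; rfl
  | cons x rest ih =>
    intro a
    simp only [List.map_cons, List.foldl_cons]
    rw [min_sub_sub_right, ih]

theorem pv_min?_shift : ∀ (xs : List Int),
    PySem.List.min? (xs.map (fun v => v - 1)) (fun v => v)
      = (PySem.List.min? xs (fun v => v)).map (fun v => v - 1) := by
  intro xs
  cases xs with
  | nil => rfl
  | cons x rest =>
    rw [List.map_cons, PySem.List.min?_id_cons, PySem.List.min?_id_cons]
    simp only [Option.map_some]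
    rw [pv_foldl_min_shift]

theorem pv_floordiv_sub (d m : Int) (hm : 0 < m) :
    PySem.Int.floordiv (d - m) m = PySem.Int.floordiv d m - 1 := by
  rw [PySem.Int.floordiv_eq_ediv_of_pos hm, PySem.Int.floordiv_eq_ediv_of_pos hm]
  have h := Int.add_mul_ediv_right d (-1) (show m ≠ 0 by omega)
  have : d - m = d + (-1) * m := by ring
  rw [this, h]
  ring

theorem pv_enumerate_snd : ∀ (xs : List String) (i : Int),
    (PySem.List.enumerate xs i).map (·.2) = xs := by
  intro xs
  induction xs with
  | nil => intro i; rfl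
  | cons x rest ih => intro i; simp [PySem.List.enumerate, ih]

theorem pv_update_self : ∀ (xs s : List String), (∀ x ∈ xs, x ∈ s) → PySem.Set.update s xs = s := by
  intro xs
  induction xs with
  | nil => intro s _; rfl
  | cons x rest ih =>
    intro s h
    have : PySem.Set.update s (x :: rest) = PySem.Set.update (PySem.Set.add s x) rest := rfl
    rw [this, PySem.Set.add_of_mem (h x (by simp))]
    exact ih s (fun z hz => h z (by simp [hz]))

-- ---- the (gap, year) reverse-sort order used by both programs ----

def pvR (g : String → Int) (a b : String) : Prop := g b < g a ∨ (g a = g b ∧ b < a)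

theorem pvR_trans (g : String → Int) {a b c : String} (h1 : pvR g a b) (h2 : pvR g b c) : pvR g a c := by
  rcases h1 with h1 | ⟨h1e, h1s⟩ <;> rcases h2 with h2 | ⟨h2e, h2s⟩
  · exact Or.inl (lt_trans h2 h1)
  · exact Or.inl (h2e ▸ h1)
  · exact Or.inl (h1e ▸ h2)
  · exact Or.inr ⟨h1e.trans h2e, lt_trans h2s h1s⟩

theorem pvR_asymm (g : String → Int) {a b : String} (h1 : pvR g a b) (h2 : pvR g b a) : False := by
  rcases h1 with h1 | ⟨h1e, h1s⟩ <;> rcases h2 with h2 | ⟨h2e, h2s⟩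
  · exact absurd h1 (not_lt.mpr (le_of_lt h2))
  · exact absurd h1 (not_lt.mpr (le_of_eq h2e.symm))
  · exact absurd h2 (not_lt.mpr (le_of_eq h1e.symm))
  · exact absurd h1s (not_lt.mpr (le_of_lt h2s))

theorem pvR_total (g : String → Int) {a b : String} (h : a ≠ b) : pvR g a b ∨ pvR g b a := by
  rcases lt_trichotomy (g a) (g b) with hg | hg | hg
  · exact Or.inr (Or.inl hg)
  · rcases lt_trichotomy a b with hs | hs | hs
    · exact Or.inr (Or.inr ⟨hg.symm, hs⟩)
    · exact absurd hs h
    · exact Or.inl (Or.inr ⟨hg, hs⟩)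
  · exact Or.inl (Or.inl hg)

theorem pv_before_iff (g : String → Int) (a b : String) :
    (decide (g b < g a) || (!decide (g a < g b) && decide (b < a))) = true ↔ pvR g a b := by
  simp only [Bool.or_eq_true, Bool.and_eq_true, Bool.not_eq_eq_eq_not, Bool.not_true,
    decide_eq_true_eq, decide_eq_false_iff_not, pvR]
  constructor
  · rintro (h | ⟨hng, hs⟩)
    · exact Or.inl h
    · rcases lt_trichotomy (g a) (g b) with hg | hg | hg
      · exact absurd hg hng
      · exact Or.inr ⟨hg, hs⟩
      · exact Or.inl hg
  · rintro (h | ⟨he, hs⟩)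
    · exact Or.inl h
    · exact Or.inr ⟨by omega, hs⟩

theorem pv_insertBy_pairwise (g : String → Int) (x : String) :
    ∀ (l : List String), l.Pairwise (pvR g) → x ∉ l →
      (PySem.List.insertBy (fun a b => decide (g b < g a) || (!decide (g a < g b) && decide (b < a))) x l).Pairwise (pvR g) := by
  intro l
  induction l with
  | nil => intro _ _; simp [PySem.List.insertBy]
  | cons y ys ih =>
    intro hp hx
    rw [PySem.List.insertBy]
    by_cases hb : (decide (g y < g x) || (!decide (g x < g y) && decide (y < x))) = true
    · rw [if_pos hb]
      have hxy : pvR g x y := (pv_before_iff g x y).mp hb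
      refine List.Pairwise.cons ?_ hp
      intro z hz
      rcases List.mem_cons.mp hz with rfl | hz
      · exact hxy
      · exact pvR_trans g hxy (List.rel_of_pairwise_cons hp hz)
    · rw [if_neg hb]
      have hnxy : ¬ pvR g x y := fun hc => hb ((pv_before_iff g x y).mpr hc)
      have hxy : x ≠ y := fun hc => hx (hc ▸ List.mem_cons_self)
      have hyx : pvR g y x := by
        rcases pvR_total g hxy with h | h
        · exact absurd h hnxy
        · exact h
      refine List.Pairwise.cons ?_ (ih hp.of_cons (fun hc => hx (List.mem_cons_of_mem y hc)))
      intro z hz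
      rcases (PySem.List.mem_insertBy _ x z ys).mp hz with rfl | hz
      · exact hyx
      · exact List.rel_of_pairwise_cons hp hz

theorem pv_sorted2_foldl_aux (g : String → Int) :
    ∀ (xs acc : List String), acc.Pairwise (pvR g) → (∀ x ∈ xs, x ∉ acc) → xs.Nodup →
      (xs.foldl (fun acc x =>
        PySem.List.insertBy (fun a b => decide (g b < g a) || (!decide (g a < g b) && decide (b < a))) x acc)
        acc).Pairwise (pvR g) := by
  intro xs
  induction xs with
  | nil => intro acc hp _ _; simpa using hp
  | cons x rest ih =>
    intro acc hp hdis hnd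
    rw [List.foldl_cons]
    refine ih _ (pv_insertBy_pairwise g x acc hp (hdis x List.mem_cons_self)) ?_ hnd.of_cons
    intro z hz hmem
    rcases (PySem.List.mem_insertBy _ x z acc).mp hmem with rfl | hmem
    · exact (List.nodup_cons.mp hnd).1 hz
    · exact hdis z (List.mem_cons_of_mem x hz) hmem

theorem pv_sorted2_pairwise (g : String → Int) (xs : List String) (h : xs.Nodup) :
    (PySem.List.sorted2 xs g (fun y => y) true).Pairwise (pvR g) := by
  have := pv_sorted2_foldl_aux g xs [] (by simp) (by simp) h
  simpa [PySem.List.sorted2] using this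

theorem pv_sorted2_eq (g : String → Int) (xs ys : List String) (hxs : xs.Nodup)
    (hperm : ys.Perm xs) (hp : ys.Pairwise (pvR g)) :
    PySem.List.sorted2 xs g (fun y => y) true = ys := by
  have hsp : (PySem.List.sorted2 xs g (fun y => y) true).Pairwise (pvR g) :=
    pv_sorted2_pairwise g xs hxs
  have hperm' : (PySem.List.sorted2 xs g (fun y => y) true).Perm ys :=
    (PySem.List.sorted2_perm xs g (fun y => y) true).trans hperm.symm
  exact List.Perm.eq_of_pairwise
    (fun a b _ _ hab hba => absurd (pvR_asymm g hab hba) not_false) hsp hp hperm'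

-- filtering commutes with the reverse sort (distinct keys make the order unique)
theorem pv_filter_sorted2 (g : String → Int) (years : List String) (h : years.Nodup) (p : String → Bool) :
    (PySem.List.sorted2 years g (fun y => y) true).filter p
      = PySem.List.sorted2 (years.filter p) g (fun y => y) true := by
  symm
  exact pv_sorted2_eq g (years.filter p) ((PySem.List.sorted2 years g (fun y => y) true).filter p)
    (h.filter p)
    (List.Perm.filter p (PySem.List.sorted2_perm years g (fun y => y) true))
    (List.Pairwise.filter p (pv_sorted2_pairwise g years h))

-- ---- characterisation of A's pass ----

theorem pv_aFor_run (avail : PySem.Dict String Int) (total : Int) :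
    ∀ (cands : List String) (q : PySem.Dict String Int) (s : Int) (prog : Bool),
      cands.Nodup → s < total →
      pvAFor avail total cands q s prog =
        (pvAdd ((pvSpare avail q cands).take (min (total - s).toNat (pvSpare avail q cands).length)) 1 q,
         s + ((min (total - s).toNat (pvSpare avail q cands).length : Nat) : Int),
         prog || decide (0 < min (total - s).toNat (pvSpare avail q cands).length)) := by
  intro cands
  induction cands with
  | nil =>
    intro q s prog _ _
    simp [pvAFor, pvSpare, pvAdd]
  | cons y rest ih =>
    intro q s prog hnd hlt
    have hyrest : y ∉ rest := (List.nodup_cons.mp hnd).1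
    by_cases hy : q.getD y 0 < avail.getD y 0
    · have hsp : pvSpare avail q (y :: rest) = y :: pvSpare avail q rest := by
        simp [pvSpare, hy]
      by_cases hb : s + 1 = total
      · -- the pass breaks immediately after this increment
        have htn : (total - s).toNat = 1 := by omega
        have hmin : min (total - s).toNat (pvSpare avail q (y :: rest)).length = 1 := by
          rw [htn, hsp]; simp
        rw [pvAFor, if_pos hy, if_pos hb]
        rw [hmin, hsp]
        simp only [List.take_succ_cons, List.take_zero]
        have : pvAdd [y] 1 q = q.insert y (q.getD y 0 + 1) := rfl
        rw [this, hb]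
        simp
        omega
      · -- continue the pass with assigned = s + 1
        have hlt' : s + 1 < total := by omega
        have hrw : pvSpare avail (q.insert y (q.getD y 0 + 1)) rest = pvSpare avail q rest := by
          apply List.filter_congr
          intro z hz
          have hne : z ≠ y := fun hc => hyrest (hc ▸ hz)
          simp [PySem.Dict.getD_insert, hne]
        rw [pvAFor, if_pos hy, if_neg hb, ih _ (s + 1) true hnd.of_cons hlt', hrw]
        have hk : min (total - s).toNat (pvSpare avail q (y :: rest)).length
            = min (total - (s + 1)).toNat (pvSpare avail q rest).length + 1 := by
          rw [hsp]; simp only [List.length_cons]; omega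
        rw [hk, hsp]
        simp only [List.take_succ_cons]
        have : pvAdd (y :: (pvSpare avail q rest).take (min (total - (s + 1)).toNat (pvSpare avail q rest).length)) 1 q
            = pvAdd ((pvSpare avail q rest).take (min (total - (s + 1)).toNat (pvSpare avail q rest).length)) 1
                (q.insert y (q.getD y 0 + 1)) := rfl
        rw [this]
        refine Prod.ext rfl (Prod.ext ?_ ?_)
        · simp only []; push_cast; ring
        · simp
    · have hsp : pvSpare avail q (y :: rest) = pvSpare avail q rest := by
        simp [pvSpare, hy]
      rw [pvAFor, if_neg hy, ih q s prog hnd.of_cons hlt, hsp]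

-- ---- B makes the same move as one full round-robin pass of A ----

theorem pv_peel (avail : PySem.Dict String Int) (years : List String) (q : PySem.Dict String Int)
    (deficit : Int) (hnd : years.Nodup) (hk : q.keys = years) (h0 : 0 < deficit)
    (hs : pvSpare avail q years ≠ [])
    (hd : ((pvSpare avail q years).length : Int) ≤ deficit) :
    pvBWhile avail years q deficit
      = pvBWhile avail years (pvAdd (pvSpare avail q years) 1 q)
          (deficit - ((pvSpare avail q years).length : Int)) := by
  have hmnat : (pvSpare avail q years).length ≠ 0 := by
    simpa [List.length_eq_zero_iff] using hs
  set spare := pvSpare avail q years with hspdef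
  set m : Int := (spare.length : Int) with hmdef
  have hmpos : 0 < m := by rw [hmdef]; omega
  obtain ⟨g, hg⟩ : ∃ g, PySem.List.min? (spare.map (pvGap avail q)) (fun v => v) = some g := by
    cases hmin : PySem.List.min? (spare.map (pvGap avail q)) (fun v => v) with
    | none =>
      rw [PySem.List.min?_eq_none_iff, List.map_eq_nil_iff] at hmin
      exact absurd hmin hs
    | some g => exact ⟨g, rfl⟩
  have hgmin : ∀ y ∈ spare, g ≤ pvGap avail q y := by
    intro y hy
    have := PySem.List.min?_isMin hg (pvGap avail q y) (List.mem_map_of_mem hy)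
    simpa using this
  have hspare_lt : ∀ y ∈ spare, q.getD y 0 < avail.getD y 0 := by
    intro y hy
    rw [hspdef, pvSpare, List.mem_filter] at hy
    simpa using hy.2
  have hg1 : 1 ≤ g := by
    have hmem := PySem.List.min?_mem hg
    simp only [List.mem_map] at hmem
    obtain ⟨y, hy, hgy⟩ := hmem
    have := hspare_lt y hy
    rw [← hgy]; simp only [pvGap]; omega
  have hstep : pvStep avail q years deficit = min (PySem.Int.floordiv deficit m) g := by
    rw [pvStep, ← hspdef, hg]; rfl
  set t := min (PySem.Int.floordiv deficit m) g with htdef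
  have ht1 : 1 ≤ t := by
    refine le_min ?_ hg1
    rw [PySem.Int.le_floordiv_iff_mul_le hmpos]; omega
  have htm : t * m ≤ deficit := by
    have h1 : t ≤ PySem.Int.floordiv deficit m := min_le_left _ _
    exact (PySem.Int.le_floordiv_iff_mul_le hmpos).mp h1
  conv_lhs => rw [pvBWhile]
  rw [dif_pos h0, dif_neg hs, dif_neg (not_lt.mpr hd), ← hspdef, ← hmdef, hstep]
  by_cases hone : t = 1
  · rw [hone, one_mul]
  · have ht2 : 2 ≤ t := by omega
    have h2m : 2 * m ≤ t * m := mul_le_mul_of_nonneg_right ht2 (by omega)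
    set q1 := pvAdd spare 1 q with hq1def
    have hnds : spare.Nodup := by rw [hspdef, pvSpare]; exact hnd.filter _
    have hsub : ∀ y ∈ spare, y ∈ q.keys := by
      intro y hy
      rw [hk]
      rw [hspdef, pvSpare] at hy
      exact List.mem_of_mem_filter hy
    have hget1 : ∀ z, q1.getD z 0 = q.getD z 0 + (if z ∈ spare then 1 else 0) :=
      pv_getD_pvAdd 1 spare q hnds
    have hkeys1 : q1.keys = years := by rw [hq1def, pv_keys_pvAdd _ _ _ hsub, hk]
    have hsp1 : pvSpare avail q1 years = spare := by
      rw [hspdef]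
      show List.filter _ years = List.filter _ years
      apply List.filter_congr
      intro z hz
      apply decide_eq_decide.mpr
      by_cases hzs : z ∈ spare
      · have hgap : g ≤ pvGap avail q z := hgmin z hzs
        have hlt := hspare_lt z hzs
        have hq1z : q1.getD z 0 = q.getD z 0 + 1 := by rw [hget1 z]; simp [hzs]
        rw [hq1z]
        simp only [pvGap] at hgap
        constructor <;> intro <;> omega
      · have hq1z : q1.getD z 0 = q.getD z 0 := by rw [hget1 z]; simp [hzs]
        rw [hq1z]
    have hg1min : PySem.List.min? (spare.map (pvGap avail q1)) (fun v => v) = some (g - 1) := by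
      have hmapc : spare.map (pvGap avail q1) = (spare.map (pvGap avail q)).map (fun v => v - 1) := by
        rw [List.map_map]
        apply List.map_congr_left
        intro z hz
        have hq1z : q1.getD z 0 = q.getD z 0 + 1 := by rw [hget1 z]; simp [hz]
        simp only [Function.comp, pvGap, hq1z]
        ring
      rw [hmapc, pv_min?_shift, hg]
      rfl
    have hstep1 : pvStep avail q1 years (deficit - m) = t - 1 := by
      rw [pvStep, hsp1, hg1min, ← hmdef]
      simp only [Option.getD_some]
      rw [pv_floordiv_sub deficit m hmpos, min_sub_sub_right]
    have h01 : 0 < deficit - m := by omega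
    have hs1 : pvSpare avail q1 years ≠ [] := by rw [hsp1]; exact hs
    have hd1 : ¬ (deficit - m < ((pvSpare avail q1 years).length : Int)) := by
      rw [hsp1, ← hmdef]; omega
    conv_rhs => rw [pvBWhile]
    rw [dif_pos h01, dif_neg hs1, dif_neg hd1, hsp1, ← hmdef, hstep1]
    have hdict : pvAdd spare t q = pvAdd spare (t - 1) q1 := by
      apply pv_dict_ext
      · rw [pv_keys_pvAdd _ _ _ hsub, pv_keys_pvAdd _ _ _ (by intro y hy; rw [hkeys1, ← hk]; exact hsub y hy), hkeys1, hk]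
      · rw [pv_keys_pvAdd _ _ _ hsub, hk]; exact hnd
      · intro z _
        rw [pv_getD_pvAdd _ _ _ hnds z, pv_getD_pvAdd _ _ _ hnds z, hget1 z]
        split_ifs <;> ring
    rw [hdict]
    congr 1
    ring

-- ---- the two loops agree ----

theorem pv_main (avail : PySem.Dict String Int) (years : List String) (total : Int)
    (hnd : years.Nodup) :
    ∀ (N : Nat) (q : PySem.Dict String Int) (s : Int), (total - s).toNat ≤ N → q.keys = years →
      pvAWhile avail years total q s = pvBWhile avail years q (total - s) := by
  intro N
  induction N with
  | zero =>
    intro q s hN hk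
    rw [pvAWhile, pvBWhile, dif_neg (by omega : ¬ s < total), dif_neg (by omega : ¬ (0:Int) < total - s)]
  | succ n ih =>
    intro q s hN hk
    by_cases hlt : s < total
    · set cands := PySem.List.sorted2 years (pvGap avail q) (fun y => y) true with hcands
      have hcp : cands.Perm years := PySem.List.sorted2_perm years (pvGap avail q) (fun y => y) true
      have hcnd : cands.Nodup := hcp.nodup_iff.mpr hnd
      have hfp : (pvSpare avail q cands).Perm (pvSpare avail q years) :=
        List.Perm.filter _ hcp
      have hflen : (pvSpare avail q cands).length = (pvSpare avail q years).length :=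
        hfp.length_eq
      have hrun := pv_aFor_run avail total cands q s false hcnd hlt
      rw [pvAWhile, dif_pos hlt, hrun]
      simp only []
      by_cases hsp : pvSpare avail q years = []
      · -- no year has spare capacity: both loops stop
        have hcnil : pvSpare avail q cands = [] := by
          rw [← List.length_eq_zero_iff, hflen, hsp]; rfl
        rw [pvBWhile, dif_pos (by omega : (0:Int) < total - s), dif_pos hsp]
        simp [hcnil, pvAdd]
      · have hm1 : 1 ≤ (pvSpare avail q years).length := by
          have : (pvSpare avail q years).length ≠ 0 := by
            simpa [List.length_eq_zero_iff] using hsp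
          omega
        by_cases hdm : total - s < ((pvSpare avail q years).length : Int)
        · -- final partial pass: both programs add 1 to the first (total - s) spare years
          have hkval : min (total - s).toNat (pvSpare avail q cands).length = (total - s).toNat := by
            rw [hflen]; omega
          have hkpos : 0 < min (total - s).toNat (pvSpare avail q cands).length := by omega
          rw [dif_pos (by simp [hkpos])]
          have hstot : s + ((min (total - s).toNat (pvSpare avail q cands).length : Nat) : Int) = total := by
            rw [hkval]; omega
          rw [hstot, pvAWhile, dif_neg (lt_irrefl total)]
          rw [pvBWhile, dif_pos (by omega : (0:Int) < total - s), dif_neg hsp, dif_pos hdm]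
          rw [PySem.List.slice_to _ (by omega : (0:Int) ≤ total - s)]
          have hsorted : pvSpare avail q cands
              = PySem.List.sorted2 (pvSpare avail q years) (pvGap avail q) (fun y => y) true := by
            have := pv_filter_sorted2 (pvGap avail q) years hnd
              (fun y => decide (q.getD y 0 < avail.getD y 0))
            exact this
          rw [hkval, hsorted]
        · -- a full pass: A adds 1 to every spare year; B's batch step peels off one such round
          have hkval : min (total - s).toNat (pvSpare avail q cands).length
              = (pvSpare avail q cands).length := by
            rw [hflen]; omega
          have hkpos : 0 < min (total - s).toNat (pvSpare avail q cands).length := by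
            rw [hkval, hflen]; omega
          rw [dif_pos (by simp [hkpos])]
          rw [hkval, List.take_length]
          have hsubc : ∀ y ∈ pvSpare avail q cands, y ∈ q.keys := by
            intro y hy
            rw [hk]
            exact hcp.mem_iff.mp (List.mem_of_mem_filter hy)
          have hsuby : ∀ y ∈ pvSpare avail q years, y ∈ q.keys := by
            intro y hy
            rw [hk]
            exact List.mem_of_mem_filter hy
          have hndc : (pvSpare avail q cands).Nodup := hcnd.filter _
          have hndy : (pvSpare avail q years).Nodup := hnd.filter _
          have hQ : pvAdd (pvSpare avail q cands) 1 q = pvAdd (pvSpare avail q years) 1 q := by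
            apply pv_dict_ext
            · rw [pv_keys_pvAdd _ _ _ hsubc, pv_keys_pvAdd _ _ _ hsuby]
            · rw [pv_keys_pvAdd _ _ _ hsubc, hk]; exact hnd
            · intro z _
              rw [pv_getD_pvAdd _ _ _ hndc z, pv_getD_pvAdd _ _ _ hndy z]
              by_cases hz : z ∈ pvSpare avail q years
              · rw [if_pos hz, if_pos (hfp.mem_iff.mpr hz)]
              · rw [if_neg hz, if_neg (fun hc => hz (hfp.mem_iff.mp hc))]
          have hkeys1 : (pvAdd (pvSpare avail q years) 1 q).keys = years := by
            rw [pv_keys_pvAdd _ _ _ hsuby, hk]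
          have harith : total - (s + ((pvSpare avail q cands).length : Int))
              = total - s - ((pvSpare avail q years).length : Int) := by
            rw [hflen]; ring
          rw [hQ, ih _ _ (by rw [hflen]; omega) hkeys1, harith]
          exact (pv_peel avail years q (total - s) hnd hk (by omega) hsp (by omega)).symm
    · rw [pvAWhile, pvBWhile, dif_neg hlt, dif_neg (by omega : ¬ (0:Int) < total - s)]

-- ===== VERDICT (by name: the statement is the Claim_ definition above) =====
theorem pv_top (ya : List (String × Int)) (total : Int) :
    allocate_year_quotas_py ya total = allocate_year_quotas_py_alt ya total := by
  unfold allocate_year_quotas_py allocate_year_quotas_py_alt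
  set avail := PySem.Dict.ofList ya with havail
  set years := PySem.List.sorted avail.keys (fun y => y) false with hyears
  have hnd : years.Nodup :=
    (PySem.List.sorted_perm avail.keys (fun y => y) false).nodup_iff.mpr
      (PySem.Dict.nodup_keys_ofList ya)
  have hiff : (years = [] ∨ total ≤ 0) ↔ (years.length = 0 ∨ total ≤ 0) := by
    simp [List.length_eq_zero_iff]
  by_cases hc : years = [] ∨ total ≤ 0
  · rw [if_pos hc, if_pos (hiff.mp hc)]
  · rw [if_neg hc, if_neg (fun h => hc (hiff.mpr h))]
    have hk0 : (years.foldl (fun d y => d.insert y (0 : Int)) PySem.Dict.empty).keys = years := by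
      have h := PySem.Dict.keys_foldl_insert years (fun _ _ => (0 : Int)) PySem.Dict.empty
      simp only [PySem.Dict.keys_empty] at h
      rw [h, PySem.Set.update_nil_left, PySem.Set.ofList_eq_self_of_nodup years hnd]
    have hk1 : ((PySem.List.enumerate years 0).foldl
        (fun d p => d.insert p.2 (min (PySem.Int.floordiv total years.length +
            (if p.1 < PySem.Int.mod total years.length then 1 else 0)) (avail.getD p.2 0)))
        (years.foldl (fun d y => d.insert y (0 : Int)) PySem.Dict.empty)).keys = years := by
      have h := PySem.Dict.keys_foldl_insert_key (PySem.List.enumerate years 0) (fun p => p.2)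
        (fun d p => min (PySem.Int.floordiv total years.length +
            (if p.1 < PySem.Int.mod total years.length then 1 else 0)) (avail.getD p.2 0))
        (years.foldl (fun d y => d.insert y (0 : Int)) PySem.Dict.empty)
      rw [h, hk0, pv_enumerate_snd, pv_update_self years years (fun x hx => hx)]
    exact congrArg PySem.Dict.items
      (pv_main avail years total hnd _ _ _ (le_refl _) hk1)

-- ===== VERDICT (by name: the statement is the Claim_ definition above) =====
theorem allocate_year_quotas_py_spec : Claim_equal_allocate_year_quotas_py := by
  intro ya total _
  exact pv_top ya total
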